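-- pv_equiv track=rewrite | github.com/ottoxin/weekly-journal-digest | src/weekly_journal_digest/reviewed_digest.py | _summary_blocks
-- ===== SOURCE A (Python) =====
-- def _summary_blocks(text: str) -> list[tuple[str, list[str]]]:
--     blocks: list[tuple[str, list[str]]] = []
--     paragraph_lines: list[str] = []
--     bullet_lines: list[str] = []
--
--     def flush_paragraph() -> None:
--         if paragraph_lines:
--             blocks.append(("paragraph", [" ".join(paragraph_lines)]))
--             paragraph_lines.clear()
--
--     def flush_bullets() -> None:
--         if bullet_lines:
--             blocks.append(("bullets", bullet_lines.copy()))
--             bullet_lines.clear()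
--
--     for raw_line in text.splitlines():
--         stripped = raw_line.strip()
--         if not stripped:
--             flush_paragraph()
--             flush_bullets()
--             continue
--         if stripped.startswith("- "):
--             flush_paragraph()
--             bullet_lines.append(stripped[2:].strip())
--             continue
--         flush_bullets()
--         paragraph_lines.append(stripped)
--     flush_paragraph()
--     flush_bullets()
--     return blocks
-- ===== SOURCE B (Python) =====
-- def _summary_blocks(text: str) -> list[tuple[str, list[str]]]:
--     # Phase 1: classify every line into a (tag, content) pair.
--     tagged = []
--     for raw in text.splitlines():
--         s = raw.strip()
--         if not s:
--             tagged.append(("blank", ""))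
--         elif s.startswith("- "):
--             tagged.append(("bullets", s[2:].strip()))
--         else:
--             tagged.append(("paragraph", s))
--     # Phase 2: group maximal runs of equal tags into blocks.
--     blocks = []
--     i, n = 0, len(tagged)
--     while i < n:
--         tag = tagged[i][0]
--         j = i
--         while j < n and tagged[j][0] == tag:
--             j += 1
--         if tag == "paragraph":
--             blocks.append(("paragraph", [" ".join(c for _, c in tagged[i:j])]))
--         elif tag == "bullets":
--             blocks.append(("bullets", [c for _, c in tagged[i:j]]))
--         i = j
--     return blocks
-- ===== Notes on version B (the rewrite author's own statement) =====
-- stated objective: alternative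
-- what changed: Replaced the flush-on-transition state machine (two mutable pending buffers flushed by nested helpers) by a two-phase classify-then-group pass: each line is tagged blank/bullets/paragraph, then maximal runs of equal tags are grouped into blocks.
import Mathlib
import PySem

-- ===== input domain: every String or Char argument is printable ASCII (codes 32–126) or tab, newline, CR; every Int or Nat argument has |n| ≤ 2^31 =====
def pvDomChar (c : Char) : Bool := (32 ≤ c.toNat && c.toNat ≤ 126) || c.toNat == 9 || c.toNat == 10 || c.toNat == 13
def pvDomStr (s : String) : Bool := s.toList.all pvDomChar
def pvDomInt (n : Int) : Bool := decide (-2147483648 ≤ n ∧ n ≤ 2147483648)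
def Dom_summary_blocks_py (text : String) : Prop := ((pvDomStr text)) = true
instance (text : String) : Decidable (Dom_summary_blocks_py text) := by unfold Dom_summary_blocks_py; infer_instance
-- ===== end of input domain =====

-- B replaces A's flush-on-transition state machine by a classify-then-group-runs pass (alternative decomposition, same cost).

-- ===== PORT A =====
def pvFlushP (blocks : List (String × List String)) (para : List String) : List (String × List String) :=
  if para ≠ [] then blocks ++ [("paragraph", [PySem.Str.join " " para])] else blocks

def pvFlushB (blocks : List (String × List String)) (bl : List String) : List (String × List String) :=
  if bl ≠ [] then blocks ++ [("bullets", bl)] else blocks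

def pvStepA (st : List (String × List String) × List String × List String) (raw : String) :
    List (String × List String) × List String × List String :=
  let s := PySem.Str.strip raw
  if s = "" then (pvFlushB (pvFlushP st.1 st.2.1) st.2.2, [], [])
  else if PySem.Str.startswith s "- " then
    (pvFlushP st.1 st.2.1, [], st.2.2 ++ [PySem.Str.strip (PySem.Str.slice s (some 2) none)])
  else (pvFlushB st.1 st.2.2, st.2.1 ++ [s], [])

def summary_blocks_py (text : String) : List (String × List String) :=
  let st := (PySem.Str.splitlines text).foldl pvStepA ([], [], [])
  pvFlushB (pvFlushP st.1 st.2.1) st.2.2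

-- ===== PORT B =====
def pvClassify (raw : String) : String × String :=
  let s := PySem.Str.strip raw
  if s = "" then ("blank", "")
  else if PySem.Str.startswith s "- " then ("bullets", PySem.Str.strip (PySem.Str.slice s (some 2) none))
  else ("paragraph", s)

def pvGroup : List (String × String) → List (String × List String)
  | [] => []
  | (t, c) :: rest =>
    let run := rest.takeWhile (fun p => p.1 == t)
    let tail := rest.dropWhile (fun p => p.1 == t)
    (if t = "paragraph" then [("paragraph", [PySem.Str.join " " (c :: run.map Prod.snd)])]
     else if t = "bullets" then [("bullets", c :: run.map Prod.snd)]
     else []) ++ pvGroup tail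
  termination_by tl => tl.length
  decreasing_by simpa using Nat.lt_succ_of_le (List.length_dropWhile_le _ _)

def summary_blocks_py_alt (text : String) : List (String × List String) :=
  pvGroup ((PySem.Str.splitlines text).map pvClassify)

-- ===== PRECONDITION & SPEC =====
def Spec_summary_blocks_py (text : String) (out : List (String × List String)) : Prop := out = summary_blocks_py_alt text
instance (text : String) (out : List (String × List String)) : Decidable (Spec_summary_blocks_py text out) := by unfold Spec_summary_blocks_py; infer_instance

-- ===== CLAIM (what is proved, stated in full; the proofs are below) =====
def Claim_equal_summary_blocks_py : Prop := ∀ (text : String), Dom_summary_blocks_py text → Spec_summary_blocks_py text (summary_blocks_py text)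

-- ===== LEMMAS AND PROOFS =====

-- pvGP mirrors A's loop on already-classified lines, with the pending buffers as arguments.
def pvGP : List String → List String → List (String × String) → List (String × List String)
  | para, bl, [] => pvFlushB (pvFlushP [] para) bl
  | para, bl, (t, c) :: rest =>
    if t = "blank" then pvFlushB (pvFlushP [] para) bl ++ pvGP [] [] rest
    else if t = "bullets" then pvFlushP [] para ++ pvGP [] (bl ++ [c]) rest
    else pvFlushB [] bl ++ pvGP (para ++ [c]) [] rest

theorem pvFlushP_append (blocks : List (String × List String)) (para : List String) :
    pvFlushP blocks para = blocks ++ pvFlushP [] para := by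
  unfold pvFlushP; split_ifs <;> simp

theorem pvFlushB_append (blocks : List (String × List String)) (bl : List String) :
    pvFlushB blocks bl = blocks ++ pvFlushB [] bl := by
  unfold pvFlushB; split_ifs <;> simp

theorem pvGP_blank (para bl : List String) (c : String) (rest : List (String × String)) :
    pvGP para bl (("blank", c) :: rest) = pvFlushB (pvFlushP [] para) bl ++ pvGP [] [] rest := by
  rw [pvGP]; simp

theorem pvGP_bullets (para bl : List String) (c : String) (rest : List (String × String)) :
    pvGP para bl (("bullets", c) :: rest) = pvFlushP [] para ++ pvGP [] (bl ++ [c]) rest := by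
  rw [pvGP]; simp

theorem pvGP_paragraph (para bl : List String) (c : String) (rest : List (String × String)) :
    pvGP para bl (("paragraph", c) :: rest) = pvFlushB [] bl ++ pvGP (para ++ [c]) [] rest := by
  rw [pvGP]; simp

theorem pvGroup_blank (c : String) (rest : List (String × String)) :
    pvGroup (("blank", c) :: rest) = pvGroup (rest.dropWhile (fun p => p.1 == "blank")) := by
  rw [pvGroup]; simp

theorem pvGroup_bullets (c : String) (rest : List (String × String)) :
    pvGroup (("bullets", c) :: rest) =
      ("bullets", c :: (rest.takeWhile (fun p => p.1 == "bullets")).map Prod.snd)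
        :: pvGroup (rest.dropWhile (fun p => p.1 == "bullets")) := by
  rw [pvGroup]; simp

theorem pvGroup_paragraph (c : String) (rest : List (String × String)) :
    pvGroup (("paragraph", c) :: rest) =
      ("paragraph", [PySem.Str.join " " (c :: (rest.takeWhile (fun p => p.1 == "paragraph")).map Prod.snd)])
        :: pvGroup (rest.dropWhile (fun p => p.1 == "paragraph")) := by
  rw [pvGroup]; simp

-- A's fold, finalized, equals pvGP on the classified lines, with the accumulated blocks in front.
theorem pvFoldA (ls : List String) (blocks : List (String × List String)) (para bl : List String) :
    (let st := ls.foldl pvStepA (blocks, para, bl)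
     pvFlushB (pvFlushP st.1 st.2.1) st.2.2) = blocks ++ pvGP para bl (ls.map pvClassify) := by
  induction ls generalizing blocks para bl with
  | nil =>
    simp only [List.foldl_nil, List.map_nil, pvGP]
    rw [pvFlushP_append, pvFlushB_append, pvFlushB_append (pvFlushP [] para)]
    simp
  | cons x rest ih =>
    simp only [List.foldl_cons, List.map_cons]
    by_cases h1 : PySem.Str.strip x = ""
    · rw [show pvStepA (blocks, para, bl) x = (pvFlushB (pvFlushP blocks para) bl, [], []) by
        simp [pvStepA, h1]]
      rw [show pvClassify x = ("blank", "") by simp [pvClassify, h1]]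
      rw [ih, pvGP_blank]
      rw [pvFlushP_append, pvFlushB_append, pvFlushB_append (pvFlushP [] para)]
      simp
    · by_cases h2 : PySem.Chars.startswith (PySem.Chars.strip x.toList) ['-', ' '] = true
      · rw [show pvStepA (blocks, para, bl) x =
            (pvFlushP blocks para, [], bl ++ [PySem.Str.strip (PySem.Str.slice (PySem.Str.strip x) (some 2) none)]) by
          simp [pvStepA, h1, h2]]
        rw [show pvClassify x = ("bullets", PySem.Str.strip (PySem.Str.slice (PySem.Str.strip x) (some 2) none)) by
          simp [pvClassify, h1, h2]]
        rw [ih, pvGP_bullets]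
        rw [pvFlushP_append]
        simp
      · rw [show pvStepA (blocks, para, bl) x = (pvFlushB blocks bl, para ++ [PySem.Str.strip x], []) by
          simp [pvStepA, h1, h2]]
        rw [show pvClassify x = ("paragraph", PySem.Str.strip x) by simp [pvClassify, h1, h2]]
        rw [ih, pvGP_paragraph]
        rw [pvFlushB_append]
        simp

def pvTagsOK (tl : List (String × String)) : Prop :=
  ∀ p ∈ tl, p.1 = "blank" ∨ p.1 = "bullets" ∨ p.1 = "paragraph"

theorem pvClassify_tags (ls : List String) : pvTagsOK (ls.map pvClassify) := by
  intro p hp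
  rcases List.mem_map.1 hp with ⟨x, _, rfl⟩
  by_cases h1 : PySem.Str.strip x = ""
  · simp [pvClassify, h1]
  · by_cases h2 : PySem.Chars.startswith (PySem.Chars.strip x.toList) ['-', ' '] = true
    · simp [pvClassify, h1, h2]
    · simp [pvClassify, h1, h2]

theorem pvGP_para (tl : List (String × String)) (para : List String) (hpara : para ≠ [])
    (htags : pvTagsOK tl) :
    pvGP para [] tl =
      ("paragraph", [PySem.Str.join " " (para ++ (tl.takeWhile (fun p => p.1 == "paragraph")).map Prod.snd)])
        :: pvGP [] [] (tl.dropWhile (fun p => p.1 == "paragraph")) := by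
  induction tl generalizing para with
  | nil => simp [pvGP, pvFlushP, pvFlushB, hpara]
  | cons hd rest ih =>
    obtain ⟨t, c⟩ := hd
    have hrest : pvTagsOK rest := fun p hp => htags p (List.mem_cons_of_mem _ hp)
    rcases htags ⟨t, c⟩ List.mem_cons_self with ht | ht | ht <;> subst ht
    · rw [pvGP_blank, List.takeWhile_cons_of_neg (by simp), List.dropWhile_cons_of_neg (by simp),
        pvGP_blank]
      simp [pvFlushP, pvFlushB, hpara]
    · rw [pvGP_bullets, List.takeWhile_cons_of_neg (by simp), List.dropWhile_cons_of_neg (by simp),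
        pvGP_bullets]
      simp [pvFlushP, hpara]
    · rw [pvGP_paragraph, List.takeWhile_cons_of_pos (by simp), List.dropWhile_cons_of_pos (by simp)]
      rw [ih (para ++ [c]) (by simp) hrest]
      simp [pvFlushB, List.append_assoc]

theorem pvGP_bul (tl : List (String × String)) (bl : List String) (hbl : bl ≠ [])
    (htags : pvTagsOK tl) :
    pvGP [] bl tl =
      ("bullets", bl ++ (tl.takeWhile (fun p => p.1 == "bullets")).map Prod.snd)
        :: pvGP [] [] (tl.dropWhile (fun p => p.1 == "bullets")) := by
  induction tl generalizing bl with
  | nil => simp [pvGP, pvFlushP, pvFlushB, hbl]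
  | cons hd rest ih =>
    obtain ⟨t, c⟩ := hd
    have hrest : pvTagsOK rest := fun p hp => htags p (List.mem_cons_of_mem _ hp)
    rcases htags ⟨t, c⟩ List.mem_cons_self with ht | ht | ht <;> subst ht
    · rw [pvGP_blank, List.takeWhile_cons_of_neg (by simp), List.dropWhile_cons_of_neg (by simp),
        pvGP_blank]
      simp [pvFlushP, pvFlushB, hbl]
    · rw [pvGP_bullets, List.takeWhile_cons_of_pos (by simp), List.dropWhile_cons_of_pos (by simp)]
      rw [ih (bl ++ [c]) (by simp) hrest]
      simp [pvFlushP, List.append_assoc]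
    · rw [pvGP_paragraph, List.takeWhile_cons_of_neg (by simp), List.dropWhile_cons_of_neg (by simp),
        pvGP_paragraph]
      simp [pvFlushB, hbl]

theorem pvGroup_dropBlank (rest : List (String × String)) :
    pvGroup (rest.dropWhile (fun p => p.1 == "blank")) = pvGroup rest := by
  cases rest with
  | nil => rfl
  | cons hd r =>
    obtain ⟨t, c⟩ := hd
    by_cases ht : t = "blank"
    · subst ht
      rw [List.dropWhile_cons_of_pos (by simp), pvGroup_blank]
    · rw [List.dropWhile_cons_of_neg (by simpa using ht)]

theorem pvGP_eq_pvGroup (n : ℕ) (tl : List (String × String)) (hn : tl.length ≤ n)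
    (htags : pvTagsOK tl) : pvGP [] [] tl = pvGroup tl := by
  induction n generalizing tl with
  | zero =>
    have : tl = [] := List.eq_nil_of_length_eq_zero (Nat.le_zero.1 hn)
    subst this; simp [pvGP, pvGroup, pvFlushP, pvFlushB]
  | succ m ih =>
    cases tl with
    | nil => simp [pvGP, pvGroup, pvFlushP, pvFlushB]
    | cons hd rest =>
      obtain ⟨t, c⟩ := hd
      have hrest : pvTagsOK rest := fun p hp => htags p (List.mem_cons_of_mem _ hp)
      have hlen : rest.length ≤ m := by simpa using hn
      rcases htags ⟨t, c⟩ List.mem_cons_self with ht | ht | ht <;> subst ht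
      · rw [pvGP_blank, pvGroup_blank, pvGroup_dropBlank]
        rw [ih rest hlen hrest]
        simp [pvFlushP, pvFlushB]
      · rw [pvGP_bullets, pvGroup_bullets]
        simp only [List.nil_append]
        rw [pvGP_bul rest [c] (by simp) hrest]
        rw [ih (rest.dropWhile (fun p => p.1 == "bullets"))
            (le_trans (List.length_dropWhile_le _ _) hlen)
            (fun p hp => hrest p ((List.dropWhile_sublist _).mem hp))]
        simp [pvFlushP]
      · rw [pvGP_paragraph, pvGroup_paragraph]
        simp only [List.nil_append]
        rw [pvGP_para rest [c] (by simp) hrest]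
        rw [ih (rest.dropWhile (fun p => p.1 == "paragraph"))
            (le_trans (List.length_dropWhile_le _ _) hlen)
            (fun p hp => hrest p ((List.dropWhile_sublist _).mem hp))]
        simp [pvFlushB]

-- ===== VERDICT (by name: the statement is the Claim_ definition above) =====
theorem summary_blocks_py_spec : Claim_equal_summary_blocks_py := by
  intro text _
  unfold Spec_summary_blocks_py summary_blocks_py summary_blocks_py_alt
  rw [pvFoldA]
  rw [pvGP_eq_pvGroup ((PySem.Str.splitlines text).map pvClassify).length _ le_rfl
      (pvClassify_tags _)]
  simp
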